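-- pv_equiv track=rewrite | github.com/VilashNaveen/Python-Tests | pythonTest/main.py | route_finding
-- ===== SOURCE A (Python) =====
-- def route_finding(N, K):
--     MOD = 10**9 + 7
--     pvar = [[[0 for _ in range(K+1)] for _ in range(N+1)] for _ in range(N+1)]
--
--     pvar[0][0][K] = 1
--
--     for x in range(N):
--         for y in range(N+1):
--             for i in range(K+1):
--                 if y < N and i > 0:
--                     pvar[x+1][y+1][i-1] = (pvar[x+1][y+1][i-1] + pvar[x][y][i]) % MOD
--
--                 n_y = max(0, y-1)
--                 n_k = K if n_y == 0 else i
--                 pvar[x+1][n_y][n_k] = (pvar[x+1][n_y][n_k] + pvar[x][y][i]) % MOD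
--
--     return pvar[N][0][K] % MOD
-- ===== SOURCE B (Python) =====
-- def route_finding(N, K):
--     MOD = 10**9 + 7
--     # g[y][i] = number of ways to complete the remaining steps from state (y, i)
--     # down to the final state (0, K); built backwards from the last layer.
--     g = [[1 if (y == 0 and i == K) else 0 for i in range(K + 1)]
--          for y in range(N + 1)]
--     for _ in range(N):
--         g = [[((g[y + 1][i - 1] if (y < N and i > 0) else 0)
--                + g[max(0, y - 1)][K if y <= 1 else i]) % MOD
--               for i in range(K + 1)]
--              for y in range(N + 1)]
--     return g[0][K] % MOD
-- ===== Notes on version B (the rewrite author's own statement) =====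
-- stated objective: alternative
-- what changed: Replaces A's forward 3D scatter DP (pvar[x][y][i] = ways to reach (y,i) after x steps, pushed into layer x+1) by a backward gather DP over a single rolling 2D layer: g[y][i] = ways to complete the remaining steps from state (y,i) to the final state (0,K), recomputed layer by layer from the end; the answer is g[0][K] after N layers.
import Mathlib
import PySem

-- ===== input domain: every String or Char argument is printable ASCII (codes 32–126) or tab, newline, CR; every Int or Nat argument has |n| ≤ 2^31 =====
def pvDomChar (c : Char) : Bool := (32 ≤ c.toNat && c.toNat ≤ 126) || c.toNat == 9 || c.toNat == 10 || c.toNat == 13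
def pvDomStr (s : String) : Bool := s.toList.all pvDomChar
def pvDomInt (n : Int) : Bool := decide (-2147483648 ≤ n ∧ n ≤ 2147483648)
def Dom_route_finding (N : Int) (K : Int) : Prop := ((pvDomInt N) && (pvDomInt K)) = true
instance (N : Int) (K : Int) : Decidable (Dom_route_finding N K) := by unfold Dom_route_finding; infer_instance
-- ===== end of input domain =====

-- B replaces A's forward 3D reachability DP by a backward completion-counting DP over one
-- rolling 2D layer (alternative decomposition; return value only, no mutation observable).

-- ===== PORT A =====
-- nested read pvar[a][b][c]; exact for the nonnegative in-range indices A uses (Pre_ gives 0 ≤ N, 0 ≤ K)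
def pvGet3 (l : List (List (List Int))) (a b c : Int) : Int :=
  PySem.List.pyGetD (PySem.List.pyGetD (PySem.List.pyGetD l a []) b []) c 0

-- nested write pvar[a][b][c] = v (the comprehension-built rows share no aliasing, so the
-- functional update is exact)
def pvSet3 (l : List (List (List Int))) (a b c : Int) (v : Int) : List (List (List Int)) :=
  PySem.List.pySetD l a
    (PySem.List.pySetD (PySem.List.pyGetD l a []) b
      (PySem.List.pySetD (PySem.List.pyGetD (PySem.List.pyGetD l a []) b []) c v))

def route_finding (N : Int) (K : Int) : Int :=
  let MOD : Int := 1000000007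
  let pvar : List (List (List Int)) :=
    (PySem.List.pyRange 0 (N+1) 1).map (fun _ =>
      (PySem.List.pyRange 0 (N+1) 1).map (fun _ =>
        (PySem.List.pyRange 0 (K+1) 1).map (fun _ => (0 : Int))))
  let pvar := pvSet3 pvar 0 0 K 1
  let pvar := (PySem.List.pyRange 0 N 1).foldl (fun pvar x =>
    (PySem.List.pyRange 0 (N+1) 1).foldl (fun pvar y =>
      (PySem.List.pyRange 0 (K+1) 1).foldl (fun pvar i =>
        let pvar := if y < N ∧ 0 < i then
            pvSet3 pvar (x+1) (y+1) (i-1)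
              (PySem.Int.mod (pvGet3 pvar (x+1) (y+1) (i-1) + pvGet3 pvar x y i) MOD)
          else pvar
        let n_y := max 0 (y-1)
        let n_k := if n_y = 0 then K else i
        pvSet3 pvar (x+1) n_y n_k
          (PySem.Int.mod (pvGet3 pvar (x+1) n_y n_k + pvGet3 pvar x y i) MOD)
      ) pvar) pvar) pvar
  PySem.Int.mod (pvGet3 pvar N 0 K) MOD

-- ===== PORT B =====
-- read g[a][b]; exact for the nonnegative in-range indices B uses
def pvGet2 (g : List (List Int)) (a b : Int) : Int :=
  PySem.List.pyGetD (PySem.List.pyGetD g a []) b 0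

def route_finding_alt (N : Int) (K : Int) : Int :=
  let MOD : Int := 1000000007
  let g : List (List Int) :=
    (PySem.List.pyRange 0 (N+1) 1).map (fun y =>
      (PySem.List.pyRange 0 (K+1) 1).map (fun i =>
        if y = 0 ∧ i = K then (1 : Int) else 0))
  let g := (PySem.List.pyRange 0 N 1).foldl (fun g _ =>
    (PySem.List.pyRange 0 (N+1) 1).map (fun y =>
      (PySem.List.pyRange 0 (K+1) 1).map (fun i =>
        PySem.Int.mod
          ((if y < N ∧ 0 < i then pvGet2 g (y+1) (i-1) else 0)
            + pvGet2 g (max 0 (y-1)) (if y ≤ 1 then K else i)) MOD))) g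
  PySem.Int.mod (pvGet2 g 0 K) MOD

-- ===== PRECONDITION & SPEC =====
-- Pre_ excludes negative N or K, on which the Python A raises IndexError at pvar[0][0][K].
def Pre_route_finding (N : Int) (K : Int) : Prop := 0 ≤ N ∧ 0 ≤ K
instance (N : Int) (K : Int) : Decidable (Pre_route_finding N K) := by
  unfold Pre_route_finding; infer_instance
def pvWitness_route_finding : Int × Int := (3, 2)

def Spec_route_finding (N : Int) (K : Int) (out : Int) : Prop := out = route_finding_alt N K
instance (N : Int) (K : Int) (out : Int) : Decidable (Spec_route_finding N K out) := by
  unfold Spec_route_finding; infer_instance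

-- ===== CLAIM (what is proved, stated in full; the proofs are below) =====
def Claim_equal_route_finding : Prop := ∀ (N : Int) (K : Int), Dom_route_finding N K →
  Pre_route_finding N K → Spec_route_finding N K (route_finding N K)

-- ===== LEMMAS AND PROOFS =====

def pvMd : Int := 1000000007

-- the (y, i) grid as one flat list of pairs, in A's iteration order
def pvPairs (N K : Int) : List (Int × Int) :=
  (PySem.List.pyRange 0 (N+1) 1).flatMap fun y =>
    (PySem.List.pyRange 0 (K+1) 1).map fun i => (y, i)

def pvUp (p : Int × Int) : Int × Int := (p.1 + 1, p.2 - 1)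
def pvDn (K : Int) (p : Int × Int) : Int × Int :=
  (max 0 (p.1 - 1), if max 0 (p.1 - 1) = 0 then K else p.2)

-- what one source cell p adds into target cell p' during A's layer push
def pvContrib (N K : Int) (F : Int × Int → Int) (p p' : Int × Int) : Int :=
  (if p.1 < N ∧ 0 < p.2 ∧ p' = pvUp p then F p else 0)
    + (if p' = pvDn K p then F p else 0)

-- functional model of A's forward layers: pvF t = contents of pvar[t] (in-grid cells)
def pvF (N K : Int) : Nat → (Int × Int) → Int
  | 0, p => if p = (0, K) then 1 else 0
  | t+1, p' => ((pvPairs N K).map (fun p => pvContrib N K (pvF N K t) p p')).sum % pvMd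

-- functional model of B's backward layers: pvG t p = completions from p with t layers left
def pvG (N K : Int) : Nat → (Int × Int) → Int
  | 0, p => if p = (0, K) then 1 else 0
  | t+1, p =>
      ((if p.1 < N ∧ 0 < p.2 then pvG N K t (pvUp p) else 0) + pvG N K t (pvDn K p)) % pvMd

-- the inner product ⟨pvF t, pvG m⟩ over the grid
def pvIP (N K : Int) (t m : Nat) : Int :=
  ((pvPairs N K).map (fun p => pvF N K t p * pvG N K m p)).sum

-- shape of A's 3D table
def pvSh (N K : Int) (l : List (List (List Int))) : Prop :=
  l.length = (N+1).toNat ∧ ∀ r ∈ l, r.length = (N+1).toNat ∧ ∀ s ∈ r, s.length = (K+1).toNat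

-- B's table after t layers
def pvGGrid (N K : Int) (t : Nat) : List (List Int) :=
  (PySem.List.pyRange 0 (N+1) 1).map fun y =>
    (PySem.List.pyRange 0 (K+1) 1).map fun i => pvG N K t (y, i)

-- ---------- generic list lemmas ----------

theorem pv_sum_mod_congr (L : List (Int × Int)) (f g : Int × Int → Int) (n : Int)
    (h : ∀ a ∈ L, f a % n = g a % n) : (L.map f).sum % n = (L.map g).sum % n := by
  induction L with
  | nil => rfl
  | cons a L ih =>
      simp only [List.map_cons, List.sum_cons]
      rw [Int.add_emod, h a (by simp), ih (fun b hb => h b (by simp [hb])), ← Int.add_emod]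

theorem pv_sum_swap (L M : List (Int × Int)) (h : Int × Int → Int × Int → Int) :
    (L.map fun a => (M.map fun b => h a b).sum).sum
      = (M.map fun b => (L.map fun a => h a b).sum).sum := by
  induction L with
  | nil => simp
  | cons a L ih => simp [PySem.List.sum_map_add_int, ih]

theorem pv_sum_delta (L : List (Int × Int)) (hnd : L.Nodup) (t₀ : Int × Int) (ht : t₀ ∈ L)
    (h : Int × Int → Int) : (L.map fun p => if p = t₀ then h p else 0).sum = h t₀ := by
  induction L with
  | nil => cases ht
  | cons a L ih =>
      by_cases ha : a = t₀
      · subst ha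
        have hz : (List.map (fun p => if p = a then h p else 0) L).sum = 0 := by
          apply List.sum_eq_zero
          intro x hx
          rcases List.mem_map.mp hx with ⟨p, hp, rfl⟩
          have : p ≠ a := fun hpa => (List.nodup_cons.mp hnd).1 (hpa ▸ hp)
          simp [this]
        simp [hz]
      · have hmem : t₀ ∈ L := by
          rcases List.mem_cons.mp ht with h' | h'
          · exact absurd h'.symm ha
          · exact h'
        simp [ha, ih (List.nodup_cons.mp hnd).2 hmem]

theorem pv_mem_pairs (N K : Int) (p : Int × Int) :
    p ∈ pvPairs N K ↔ (0 ≤ p.1 ∧ p.1 ≤ N ∧ 0 ≤ p.2 ∧ p.2 ≤ K) := by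
  obtain ⟨y, i⟩ := p
  simp only [pvPairs, List.mem_flatMap, List.mem_map, PySem.List.mem_pyRange_one, Prod.ext_iff]
  constructor
  · rintro ⟨a, ⟨h1, h2⟩, b, ⟨⟨h3, h4⟩, h5, h6⟩⟩; omega
  · rintro ⟨h1, h2, h3, h4⟩; exact ⟨y, ⟨h1, by omega⟩, i, ⟨h3, by omega⟩, rfl, rfl⟩

theorem pv_nodup_pairs (N K : Int) : (pvPairs N K).Nodup := by
  unfold pvPairs
  rw [List.nodup_flatMap]
  constructor
  · intro y _
    refine (PySem.List.nodup_pyRange_one 0 (K+1)).map ?_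
    intro a b h
    injection h
  · apply List.Pairwise.imp ?_ ((PySem.List.nodup_pyRange_one 0 (N+1)))
    intro a b hab
    simp only [List.disjoint_left, List.mem_map]
    rintro p ⟨i, _, rfl⟩ ⟨j, _, h⟩
    injection h with h1 h2
    exact hab h1.symm

theorem pv_up_mem (N K : Int) (p : Int × Int) (hp : p ∈ pvPairs N K)
    (h1 : p.1 < N) (h2 : 0 < p.2) : pvUp p ∈ pvPairs N K := by
  have := (pv_mem_pairs N K p).mp hp
  refine (pv_mem_pairs N K _).mpr ?_
  unfold pvUp
  constructor
  · omega
  · constructor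
    · omega
    · constructor <;> omega

theorem pv_dn_mem (N K : Int) (p : Int × Int) (hp : p ∈ pvPairs N K) :
    pvDn K p ∈ pvPairs N K := by
  have := (pv_mem_pairs N K p).mp hp
  refine (pv_mem_pairs N K _).mpr ?_
  unfold pvDn
  refine ⟨by omega, by omega, ?_, ?_⟩ <;> by_cases h : max 0 (p.1 - 1) = 0 <;> simp [h] <;> omega

-- ---------- the core: forward result = backward result (mod pvMd) ----------

theorem pv_exchange (N K : Int) (t m : Nat) :
    pvIP N K (t+1) m % pvMd = pvIP N K t (m+1) % pvMd := by
  unfold pvIP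
  -- drop the inner % md in pvF (t+1)
  rw [pv_sum_mod_congr (pvPairs N K)
        (fun p' => pvF N K (t+1) p' * pvG N K m p')
        (fun p' => ((pvPairs N K).map (fun p => pvContrib N K (pvF N K t) p p' * pvG N K m p')).sum)
        pvMd ?_]
  · -- swap the double sum
    rw [pv_sum_swap]
    -- collapse the inner sum for each source p, then fold the % md of pvG (m+1) back in
    apply pv_sum_mod_congr
    intro p hp
    have hcol : ((pvPairs N K).map
        (fun p' => pvContrib N K (pvF N K t) p p' * pvG N K m p')).sum
        = pvF N K t p * ((if p.1 < N ∧ 0 < p.2 then pvG N K m (pvUp p) else 0)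
            + pvG N K m (pvDn K p)) := by
      have hpm := (pv_mem_pairs N K p).mp hp
      have hud : pvUp p ≠ pvDn K p := by
        unfold pvUp pvDn
        intro h
        have h1 := congrArg Prod.fst h
        have h2 : max 0 (p.1 - 1) < p.1 + 1 := by apply max_lt <;> omega
        simp only at h1
        omega
      have hsplit : ∀ p' : Int × Int, pvContrib N K (pvF N K t) p p' * pvG N K m p'
          = (if p.1 < N ∧ 0 < p.2 then
               (if p' = pvUp p then pvF N K t p * pvG N K m p' else 0) else 0)
            + (if p' = pvDn K p then pvF N K t p * pvG N K m p' else 0) := by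
        intro p'
        unfold pvContrib
        by_cases hc : p.1 < N ∧ 0 < p.2
        · by_cases hu : p' = pvUp p
          · have hd : p' ≠ pvDn K p := by rw [hu]; exact hud
            simp [hc, hu, hd, hud]
          · by_cases hd : p' = pvDn K p <;> simp [hc, hu, hd, Ne.symm hud]
        · have h3 : ¬ (p.1 < N ∧ 0 < p.2 ∧ p' = pvUp p) := by tauto
          by_cases hd : p' = pvDn K p <;> simp [hc, hd, h3] <;> tauto
      calc ((pvPairs N K).map
              (fun p' => pvContrib N K (pvF N K t) p p' * pvG N K m p')).sum
          = ((pvPairs N K).map (fun p' =>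
              (if p.1 < N ∧ 0 < p.2 then
                 (if p' = pvUp p then pvF N K t p * pvG N K m p' else 0) else 0)
              + (if p' = pvDn K p then pvF N K t p * pvG N K m p' else 0))).sum := by
            exact congrArg _ (List.map_congr_left (fun p' _ => hsplit p'))
        _ = ((pvPairs N K).map (fun p' =>
              if p.1 < N ∧ 0 < p.2 then
                (if p' = pvUp p then pvF N K t p * pvG N K m p' else 0) else 0)).sum
            + ((pvPairs N K).map (fun p' =>
                if p' = pvDn K p then pvF N K t p * pvG N K m p' else 0)).sum := by
            exact PySem.List.sum_map_add_int _ _ _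
        _ = (if p.1 < N ∧ 0 < p.2 then pvF N K t p * pvG N K m (pvUp p) else 0)
            + pvF N K t p * pvG N K m (pvDn K p) := by
            congr 1
            · by_cases hc : p.1 < N ∧ 0 < p.2
              · simp only [hc, if_true]
                exact pv_sum_delta _ (pv_nodup_pairs N K) _
                  (pv_up_mem N K p hp hc.1 hc.2) (fun p' => pvF N K t p * pvG N K m p')
              · simp [hc]
            · exact pv_sum_delta _ (pv_nodup_pairs N K) _
                (pv_dn_mem N K p hp) (fun p' => pvF N K t p * pvG N K m p')
        _ = pvF N K t p * ((if p.1 < N ∧ 0 < p.2 then pvG N K m (pvUp p) else 0)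
              + pvG N K m (pvDn K p)) := by
            by_cases hc : p.1 < N ∧ 0 < p.2 <;> simp [hc] <;> ring
    rw [hcol]
    show _ % pvMd = pvF N K t p * pvG N K (m+1) p % pvMd
    have hm1 : pvG N K (m+1) p
        = ((if p.1 < N ∧ 0 < p.2 then pvG N K m (pvUp p) else 0) + pvG N K m (pvDn K p)) % pvMd := by
      simp [pvG, pvUp, pvDn]
    rw [hm1]
    conv_rhs => rw [Int.mul_emod]
    rw [Int.emod_emod_of_dvd _ (dvd_refl pvMd), ← Int.mul_emod]
  · -- per-target: (S % md) * g % md = S * g % md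
    intro p' _
    dsimp only
    have hF : pvF N K (t+1) p'
        = ((pvPairs N K).map (fun p => pvContrib N K (pvF N K t) p p')).sum % pvMd := by
      simp [pvF]
    rw [hF]
    conv_lhs => rw [Int.mul_emod]
    rw [Int.emod_emod_of_dvd _ (dvd_refl pvMd), ← Int.mul_emod, ← List.sum_map_mul_right]

theorem pv_chain (N K : Int) : ∀ (t m : Nat), pvIP N K t m % pvMd = pvIP N K 0 (t+m) % pvMd := by
  intro t
  induction t with
  | zero => intro m; simp
  | succ t ih =>
      intro m
      rw [pv_exchange, ih (m+1)]
      have : t + (m+1) = t + 1 + m := by omega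
      rw [this]

theorem pv_IP_right_zero (N K : Int) (hN : 0 ≤ N) (hK : 0 ≤ K) (t : Nat) :
    pvIP N K t 0 = pvF N K t (0, K) := by
  have h0 : (0, K) ∈ pvPairs N K := (pv_mem_pairs N K _).mpr (by simp; omega)
  have := pv_sum_delta (pvPairs N K) (pv_nodup_pairs N K) (0, K) h0 (fun p => pvF N K t p)
  rw [← this]
  unfold pvIP
  congr 1
  apply List.map_congr_left
  intro p _
  by_cases hp : p = (0, K) <;> simp [pvG, hp]

theorem pv_IP_left_zero (N K : Int) (hN : 0 ≤ N) (hK : 0 ≤ K) (m : Nat) :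
    pvIP N K 0 m = pvG N K m (0, K) := by
  have h0 : (0, K) ∈ pvPairs N K := (pv_mem_pairs N K _).mpr (by simp; omega)
  have := pv_sum_delta (pvPairs N K) (pv_nodup_pairs N K) (0, K) (h0) (fun p => pvG N K m p)
  rw [← this]
  unfold pvIP
  congr 1
  apply List.map_congr_left
  intro p _
  by_cases hp : p = (0, K) <;> simp [pvF, hp]

theorem pv_core (N K : Int) (hN : 0 ≤ N) (hK : 0 ≤ K) (t : Nat) :
    pvF N K t (0, K) % pvMd = pvG N K t (0, K) % pvMd := by
  rw [← pv_IP_right_zero N K hN hK t, pv_chain N K t 0, pv_IP_left_zero N K hN hK (t+0)]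
  norm_num

-- ---------- bridge: port B computes pvG ----------

theorem pv_get2_grid (N K : Int) (t : Nat) (a b : Int) (ha : 0 ≤ a) (ha2 : a < N+1)
    (hb : 0 ≤ b) (hb2 : b < K+1) : pvGet2 (pvGGrid N K t) a b = pvG N K t (a, b) := by
  unfold pvGet2 pvGGrid
  rw [PySem.List.pyGetD_map_pyRange_of_nonneg _ _ _ _ ha ha2,
      PySem.List.pyGetD_map_pyRange_of_nonneg _ _ _ _ hb hb2]

theorem pv_iter_range {α : Type} (F : α → α) (s : α) (n : Nat) :
    (List.range n).foldl (fun g _ => F g) s = F^[n] s := by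
  induction n generalizing s with
  | zero => rfl
  | succ n ih =>
      rw [List.range_succ, List.foldl_append]
      simp [ih, Function.iterate_succ_apply']

theorem pv_grid_step (N K : Int) (hN : 0 ≤ N) (hK : 0 ≤ K) (t : Nat) :
    ((PySem.List.pyRange 0 (N+1) 1).map (fun y =>
      (PySem.List.pyRange 0 (K+1) 1).map (fun i =>
        PySem.Int.mod
          ((if y < N ∧ 0 < i then pvGet2 (pvGGrid N K t) (y+1) (i-1) else 0)
            + pvGet2 (pvGGrid N K t) (max 0 (y-1)) (if y ≤ 1 then K else i)) 1000000007)))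
    = pvGGrid N K (t+1) := by
  conv_rhs => rw [pvGGrid]
  apply List.map_congr_left
  intro y hy
  have hy' := (PySem.List.mem_pyRange_one).mp hy
  apply List.map_congr_left
  intro i hi
  have hi' := (PySem.List.mem_pyRange_one).mp hi
  rw [PySem.Int.mod_eq_emod_of_pos (by norm_num)]
  have hgoalR : pvG N K (t+1) (y, i)
      = ((if y < N ∧ 0 < i then pvG N K t (y+1, i-1) else 0)
          + pvG N K t (max 0 (y-1), if max 0 (y-1) = 0 then K else i)) % pvMd := by
    simp [pvG, pvUp, pvDn]
  rw [hgoalR]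
  have hup : (if y < N ∧ 0 < i then pvGet2 (pvGGrid N K t) (y+1) (i-1) else 0)
      = (if y < N ∧ 0 < i then pvG N K t (y+1, i-1) else 0) := by
    by_cases hc : y < N ∧ 0 < i
    · simp only [hc, if_true]
      exact pv_get2_grid N K t (y+1) (i-1) (by omega) (by omega) (by omega) (by omega)
    · simp [hc]
  have hdnb : max 0 (y-1) = if y ≤ 1 then 0 else y - 1 := by
    by_cases h1 : y ≤ 1
    · simp [h1, max_eq_left (by omega : y - 1 ≤ 0)]
    · simp [h1, max_eq_right (by omega : (0:Int) ≤ y - 1)]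
  have hdn : pvGet2 (pvGGrid N K t) (max 0 (y-1)) (if y ≤ 1 then K else i)
      = pvG N K t (max 0 (y-1), if max 0 (y-1) = 0 then K else i) := by
    by_cases h1 : y ≤ 1
    · have hm0 : max 0 (y-1) = 0 := by rw [hdnb]; simp [h1]
      rw [hm0]
      simp only [h1, if_true]
      exact pv_get2_grid N K t 0 K (by omega) (by omega) hK (by omega)
    · have hm0 : max 0 (y-1) = y - 1 := by rw [hdnb]; simp [h1]
      have hne : ¬ max 0 (y-1) = 0 := by omega
      rw [hm0]
      simp only [h1, if_false, hm0 ▸ hne, if_neg (hm0 ▸ hne)]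
      exact pv_get2_grid N K t (y-1) i (by omega) (by omega) (by omega) (by omega)
  rw [hup, hdn]
  rfl

theorem pvB_eq (N K : Int) (hN : 0 ≤ N) (hK : 0 ≤ K) :
    route_finding_alt N K = pvG N K N.toNat (0, K) % pvMd := by
  unfold route_finding_alt
  dsimp only
  have h0 : ((PySem.List.pyRange 0 (N+1) 1).map (fun y =>
      (PySem.List.pyRange 0 (K+1) 1).map (fun i =>
        if y = 0 ∧ i = K then (1 : Int) else 0))) = pvGGrid N K 0 := by
    unfold pvGGrid
    apply List.map_congr_left
    intro y _
    apply List.map_congr_left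
    intro i _
    simp [pvG, Prod.ext_iff]
  rw [h0]
  have hfold : ∀ (t : Nat),
      (fun g => ((PySem.List.pyRange 0 (N+1) 1).map (fun y =>
        (PySem.List.pyRange 0 (K+1) 1).map (fun i =>
          PySem.Int.mod
            ((if y < N ∧ 0 < i then pvGet2 g (y+1) (i-1) else 0)
              + pvGet2 g (max 0 (y-1)) (if y ≤ 1 then K else i)) 1000000007))))^[t]
        (pvGGrid N K 0) = pvGGrid N K t := by
    intro t
    induction t with
    | zero => rfl
    | succ t ih => rw [Function.iterate_succ_apply', ih]; exact pv_grid_step N K hN hK t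
  rw [PySem.List.pyRange_one 0 N]
  rw [List.foldl_map]
  rw [pv_iter_range]
  simp only [Int.sub_zero]
  rw [hfold N.toNat]
  rw [pv_get2_grid N K N.toNat 0 K (by omega) (by omega) hK (by omega)]
  rw [PySem.Int.mod_eq_emod_of_pos (by norm_num)]
  rfl

-- ---------- bridge: port A computes pvF ----------

-- generic read-after-write on one python list level
theorem pv_getD_set {α : Type} (xs : List α) (i j : Int) (v d : α) (hi : 0 ≤ i)
    (hlen : i < (xs.length : Int)) (hj : 0 ≤ j) :
    PySem.List.pyGetD (PySem.List.pySetD xs i v) j d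
      = if j = i then v else PySem.List.pyGetD xs j d := by
  rw [PySem.List.pySetD_of_nonneg xs v hi]
  have h1 : PySem.List.pyGetD (xs.set i.toNat v) j d = (xs.set i.toNat v).getD j.toNat d := by
    conv_lhs => rw [show j = ((j.toNat : Nat) : Int) by omega]
    rw [PySem.List.pyGetD_natCast]
  have h2 : PySem.List.pyGetD xs j d = xs.getD j.toNat d := by
    conv_lhs => rw [show j = ((j.toNat : Nat) : Int) by omega]
    rw [PySem.List.pyGetD_natCast]
  rw [h1, h2]
  by_cases hm : j = i
  · subst hm
    simp [List.getD, show j.toNat < xs.length by omega]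
  · have hmn : j.toNat ≠ i.toNat := by omega
    simp [List.getD, List.getElem?_set, Ne.symm hmn, hmn, hm]

theorem pv_mod_def (a : Int) : PySem.Int.mod a 1000000007 = a % pvMd := by
  rw [PySem.Int.mod_eq_emod_of_pos (by norm_num)]; rfl

-- the body of A's inner loop, zeta-reduced ('up' write, then the aggregating write)
def pvBodyUp (N x : Int) (pv : List (List (List Int))) (y i : Int) : List (List (List Int)) :=
  if y < N ∧ 0 < i then
    pvSet3 pv (x+1) (y+1) (i-1)
      (PySem.Int.mod (pvGet3 pv (x+1) (y+1) (i-1) + pvGet3 pv x y i) 1000000007)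
  else pv

def pvBody (N K x : Int) (pv : List (List (List Int))) (y i : Int) : List (List (List Int)) :=
  pvSet3 (pvBodyUp N x pv y i) (x+1) (max 0 (y-1)) (if max 0 (y-1) = 0 then K else i)
    (PySem.Int.mod
      (pvGet3 (pvBodyUp N x pv y i) (x+1) (max 0 (y-1)) (if max 0 (y-1) = 0 then K else i)
        + pvGet3 (pvBodyUp N x pv y i) x y i) 1000000007)

theorem pv_foldl_pairs {α : Type} (N K : Int) (body : α → Int → Int → α) (init : α) :
    (PySem.List.pyRange 0 (N+1) 1).foldl (fun s y =>
      (PySem.List.pyRange 0 (K+1) 1).foldl (fun s i => body s y i) s) init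
    = (pvPairs N K).foldl (fun s p => body s p.1 p.2) init := by
  rw [pvPairs, List.foldl_flatMap]
  simp only [List.foldl_map]

theorem pv_sh_set3 (N K : Int) (l : List (List (List Int))) (hsh : pvSh N K l)
    (a b c v : Int) (ha : 0 ≤ a) (ha2 : a ≤ N) (hb : 0 ≤ b) (hb2 : b ≤ N) (hc : 0 ≤ c) :
    pvSh N K (pvSet3 l a b c v) := by
  obtain ⟨h1, h2⟩ := hsh
  have hrow : PySem.List.pyGetD l a [] ∈ l := by
    rw [PySem.List.pyGetD_eq_getElem l [] ha (by omega)]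
    exact List.getElem_mem _
  obtain ⟨hrl, hrc⟩ := h2 _ hrow
  have hcell : PySem.List.pyGetD (PySem.List.pyGetD l a []) b [] ∈ PySem.List.pyGetD l a [] := by
    rw [PySem.List.pyGetD_eq_getElem _ [] hb (by omega)]
    exact List.getElem_mem _
  refine ⟨by rw [pvSet3, PySem.List.length_pySetD]; exact h1, ?_⟩
  intro r hr
  rw [pvSet3, PySem.List.pySetD_of_nonneg _ _ ha] at hr
  rcases List.mem_or_eq_of_mem_set hr with hr' | rfl
  · exact h2 _ hr'
  · constructor
    · rw [PySem.List.length_pySetD]; exact hrl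
    · intro s hs
      rw [PySem.List.pySetD_of_nonneg _ _ hb] at hs
      rcases List.mem_or_eq_of_mem_set hs with hs' | rfl
      · exact hrc _ hs'
      · rw [PySem.List.length_pySetD]; exact hrc _ hcell

theorem pv_get3_set3 (N K : Int) (l : List (List (List Int))) (hsh : pvSh N K l)
    (a b c a' b' c' v : Int)
    (ha : 0 ≤ a) (ha2 : a ≤ N) (hb : 0 ≤ b) (hb2 : b ≤ N) (hc : 0 ≤ c) (hc2 : c ≤ K)
    (ha' : 0 ≤ a') (ha2' : a' ≤ N) (hb' : 0 ≤ b') (hc' : 0 ≤ c') :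
    pvGet3 (pvSet3 l a b c v) a' b' c'
      = if a' = a ∧ b' = b ∧ c' = c then v else pvGet3 l a' b' c' := by
  obtain ⟨h1, h2⟩ := hsh
  have hrow : PySem.List.pyGetD l a [] ∈ l := by
    rw [PySem.List.pyGetD_eq_getElem l [] ha (by omega)]
    exact List.getElem_mem _
  obtain ⟨hrl, hrc⟩ := h2 _ hrow
  have hcell : PySem.List.pyGetD (PySem.List.pyGetD l a []) b [] ∈ PySem.List.pyGetD l a [] := by
    rw [PySem.List.pyGetD_eq_getElem _ [] hb (by omega)]
    exact List.getElem_mem _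
  have hcl := hrc _ hcell
  unfold pvGet3 pvSet3
  rw [pv_getD_set l a a' _ [] ha (by omega) ha']
  by_cases haa : a' = a
  · subst haa
    rw [if_pos rfl]
    rw [pv_getD_set (PySem.List.pyGetD l a' []) b b' _ [] hb (by omega) hb']
    by_cases hbb : b' = b
    · subst hbb
      rw [if_pos rfl]
      rw [pv_getD_set _ c c' _ 0 hc (by omega) hc']
      by_cases hcc : c' = c
      · simp [hcc]
      · simp [hcc]
    · simp [hbb]
  · simp [haa]

-- one pass of the inner double loop, tracked against the running contribution sums
theorem pv_inner (N K : Int) (hN : 0 ≤ N) (hK : 0 ≤ K) (x : Int) (hx0 : 0 ≤ x) (hx : x < N)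
    (Fx : Int × Int → Int) :
    ∀ (L done : List (Int × Int)) (pv : List (List (List Int))),
    (∀ p ∈ L, 0 ≤ p.1 ∧ p.1 ≤ N ∧ 0 ≤ p.2 ∧ p.2 ≤ K) →
    pvSh N K pv →
    (∀ y i : Int, 0 ≤ y → y ≤ N → 0 ≤ i → i ≤ K → pvGet3 pv x y i = Fx (y, i)) →
    (∀ y i : Int, 0 ≤ y → y ≤ N → 0 ≤ i → i ≤ K →
        pvGet3 pv (x+1) y i = ((done.map (fun p => pvContrib N K Fx p (y, i))).sum) % pvMd) →
    pvSh N K (L.foldl (fun s p => pvBody N K x s p.1 p.2) pv) ∧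
    (∀ a b c : Int, 0 ≤ a → a ≤ N → 0 ≤ b → 0 ≤ c → a ≠ x+1 →
        pvGet3 (L.foldl (fun s p => pvBody N K x s p.1 p.2) pv) a b c = pvGet3 pv a b c) ∧
    (∀ y i : Int, 0 ≤ y → y ≤ N → 0 ≤ i → i ≤ K →
        pvGet3 (L.foldl (fun s p => pvBody N K x s p.1 p.2) pv) (x+1) y i
          = (((done ++ L).map (fun p => pvContrib N K Fx p (y, i))).sum) % pvMd) := by
  intro L
  induction L with
  | nil =>
      intro done pv _ hsh hlx hnext
      refine ⟨hsh, fun _ _ _ _ _ _ _ _ => rfl, ?_⟩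
      intro y i h1 h2 h3 h4
      simpa using hnext y i h1 h2 h3 h4
  | cons p L ih =>
      intro done pv hbnd hsh hlx hnext
      obtain ⟨hp1, hp2, hp3, hp4⟩ := hbnd p (List.mem_cons_self)
      have hud : pvUp p ≠ pvDn K p := by
        unfold pvUp pvDn
        intro h
        have h1 := congrArg Prod.fst h
        have h2 : max 0 (p.1 - 1) < p.1 + 1 := by apply max_lt <;> omega
        simp only at h1
        omega
      -- the state after the optional 'up' write
      have hupSh : pvSh N K (pvBodyUp N x pv p.1 p.2) := by
        unfold pvBodyUp
        split_ifs with hc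
        · exact pv_sh_set3 N K pv hsh _ _ _ _ (by omega) (by omega) (by omega) (by omega) (by omega)
        · exact hsh
      have hupOther : ∀ a b c : Int, 0 ≤ a → a ≤ N → 0 ≤ b → 0 ≤ c → a ≠ x+1 →
          pvGet3 (pvBodyUp N x pv p.1 p.2) a b c = pvGet3 pv a b c := by
        intro a b c h1 h2 h3 h4 h5
        unfold pvBodyUp
        split_ifs with hcnd
        · rw [pv_get3_set3 N K pv hsh _ _ _ _ _ _ _ (by omega) (by omega) (by omega)
              (by omega) (by omega) (by omega) h1 h2 h3 h4]
          simp [h5]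
        · rfl
      have hupNext : ∀ y i : Int, 0 ≤ y → y ≤ N → 0 ≤ i → i ≤ K →
          pvGet3 (pvBodyUp N x pv p.1 p.2) (x+1) y i
            = ((done.map (fun q => pvContrib N K Fx q (y, i))).sum
                + (if p.1 < N ∧ 0 < p.2 ∧ (y, i) = pvUp p then Fx p else 0)) % pvMd := by
        intro y i h1 h2 h3 h4
        unfold pvBodyUp
        by_cases hcnd : p.1 < N ∧ 0 < p.2
        · rw [if_pos hcnd, pv_get3_set3 N K pv hsh _ _ _ _ _ _ _ (by omega) (by omega) (by omega)
              (by omega) (by omega) (by omega) (by omega) (by omega) h1 h3]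
          by_cases he : (y, i) = pvUp p
          · have hy : y = p.1 + 1 := congrArg Prod.fst he
            have hi2 : i = p.2 - 1 := congrArg Prod.snd he
            subst hy; subst hi2
            rw [if_pos ⟨rfl, rfl, rfl⟩, pv_mod_def,
                hnext (p.1+1) (p.2-1) (by omega) (by omega) (by omega) (by omega),
                hlx p.1 p.2 (by omega) (by omega) (by omega) (by omega),
                Int.emod_add_emod, if_pos ⟨hcnd.1, hcnd.2, he⟩]
          · have h5 : ¬ (x+1 = x+1 ∧ y = p.1+1 ∧ i = p.2-1) := by
              intro hcon
              exact he (Prod.ext hcon.2.1 hcon.2.2)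
            rw [if_neg h5, hnext y i h1 h2 h3 h4]
            simp [he]
        · rw [if_neg hcnd, hnext y i h1 h2 h3 h4]
          have h5 : ¬ (p.1 < N ∧ 0 < p.2 ∧ (y, i) = pvUp p) := by tauto
          simp [h5]
      have hupX : ∀ y i : Int, 0 ≤ y → y ≤ N → 0 ≤ i → i ≤ K →
          pvGet3 (pvBodyUp N x pv p.1 p.2) x y i = Fx (y, i) := by
        intro y i h1 h2 h3 h4
        rw [hupOther x y i hx0 (by omega) h1 h3 (by omega), hlx y i h1 h2 h3 h4]
      -- the state after the aggregating write
      have hdnIn : 0 ≤ max 0 (p.1-1) ∧ max 0 (p.1-1) ≤ N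
          ∧ 0 ≤ (if max 0 (p.1-1) = 0 then K else p.2)
          ∧ (if max 0 (p.1-1) = 0 then K else p.2) ≤ K := by
        refine ⟨by omega, by omega, ?_, ?_⟩ <;> split_ifs <;> omega
      have hdnEq : pvDn K p = (max 0 (p.1-1), if max 0 (p.1-1) = 0 then K else p.2) := rfl
      have hstepSh : pvSh N K (pvBody N K x pv p.1 p.2) := by
        unfold pvBody
        exact pv_sh_set3 N K _ hupSh _ _ _ _ (by omega) (by omega) hdnIn.1 hdnIn.2.1 hdnIn.2.2.1
      have hstepOther : ∀ a b c : Int, 0 ≤ a → a ≤ N → 0 ≤ b → 0 ≤ c → a ≠ x+1 →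
          pvGet3 (pvBody N K x pv p.1 p.2) a b c = pvGet3 pv a b c := by
        intro a b c h1 h2 h3 h4 h5
        unfold pvBody
        rw [pv_get3_set3 N K _ hupSh _ _ _ _ _ _ _ (by omega) (by omega) hdnIn.1 hdnIn.2.1
            hdnIn.2.2.1 hdnIn.2.2.2 h1 h2 h3 h4]
        rw [if_neg (by tauto)]
        exact hupOther a b c h1 h2 h3 h4 h5
      have hstepX : ∀ y i : Int, 0 ≤ y → y ≤ N → 0 ≤ i → i ≤ K →
          pvGet3 (pvBody N K x pv p.1 p.2) x y i = Fx (y, i) := by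
        intro y i h1 h2 h3 h4
        rw [hstepOther x y i hx0 (by omega) h1 h3 (by omega), hlx y i h1 h2 h3 h4]
      have hstepNext : ∀ y i : Int, 0 ≤ y → y ≤ N → 0 ≤ i → i ≤ K →
          pvGet3 (pvBody N K x pv p.1 p.2) (x+1) y i
            = (((done ++ [p]).map (fun q => pvContrib N K Fx q (y, i))).sum) % pvMd := by
        intro y i h1 h2 h3 h4
        have hsum : ∀ y' i' : Int, ((done ++ [p]).map (fun q => pvContrib N K Fx q (y', i'))).sum
            = (done.map (fun q => pvContrib N K Fx q (y', i'))).sum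
              + ((if p.1 < N ∧ 0 < p.2 ∧ (y', i') = pvUp p then Fx p else 0)
                  + (if (y', i') = pvDn K p then Fx p else 0)) := by
          intro y' i'
          rw [List.map_append, List.sum_append]
          simp only [List.map_cons, List.map_nil, List.sum_cons, List.sum_nil, add_zero]
          rfl
        unfold pvBody
        rw [pv_get3_set3 N K _ hupSh _ _ _ _ _ _ _ (by omega) (by omega) hdnIn.1 hdnIn.2.1
            hdnIn.2.2.1 hdnIn.2.2.2 (by omega) (by omega) h1 h3]
        by_cases hdcell : (y, i) = pvDn K p
        · have hy : y = max 0 (p.1-1) := congrArg Prod.fst hdcell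
          have hi2 : i = (if max 0 (p.1-1) = 0 then K else p.2) := congrArg Prod.snd hdcell
          subst hy; subst hi2
          rw [if_pos ⟨rfl, rfl, rfl⟩, pv_mod_def,
              hupNext (max 0 (p.1-1)) (if max 0 (p.1-1) = 0 then K else p.2)
                hdnIn.1 hdnIn.2.1 hdnIn.2.2.1 hdnIn.2.2.2,
              hupX p.1 p.2 (by omega) (by omega) (by omega) (by omega),
              Int.emod_add_emod, hsum, if_pos hdcell]
          have hupne : ¬ (p.1 < N ∧ 0 < p.2
              ∧ ((max 0 (p.1-1), if max 0 (p.1-1) = 0 then K else p.2) : Int × Int) = pvUp p) := by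
            rintro ⟨_, _, hcon⟩
            exact hud (hcon.symm.trans hdnEq.symm)
          rw [if_neg hupne]
          simp only [add_zero]
          ring_nf
        · have hcond : ¬ (x+1 = x+1 ∧ y = max 0 (p.1-1) ∧ i = (if max 0 (p.1-1) = 0 then K else p.2)) := by
            intro hcon
            exact hdcell (hdnEq ▸ Prod.ext hcon.2.1 hcon.2.2)
          rw [if_neg hcond, hupNext y i h1 h2 h3 h4, hsum, if_neg hdcell]
          simp
      -- close with the induction hypothesis
      have := ih (done ++ [p]) (pvBody N K x pv p.1 p.2)
        (fun q hq => hbnd q (List.mem_cons_of_mem _ hq)) hstepSh hstepX hstepNext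
      obtain ⟨r1, r2, r3⟩ := this
      refine ⟨by simpa using r1, ?_, ?_⟩
      · intro a b c h1 h2 h3 h4 h5
        have := r2 a b c h1 h2 h3 h4 h5
        simp only [List.foldl_cons]
        rw [this, hstepOther a b c h1 h2 h3 h4 h5]
      · intro y i h1 h2 h3 h4
        have := r3 y i h1 h2 h3 h4
        simp only [List.foldl_cons]
        rw [this]
        congr 2
        simp

theorem pv_outer (N K : Int) (hN : 0 ≤ N) (hK : 0 ≤ K) :
    ∀ (m t : Nat) (pv : List (List (List Int))), (t : Int) + (m : Int) = N →
    pvSh N K pv →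
    (∀ (a : Nat) (y i : Int), (a : Int) ≤ N → 0 ≤ y → y ≤ N → 0 ≤ i → i ≤ K →
        pvGet3 pv (a : Int) y i = if a ≤ t then pvF N K a (y, i) else 0) →
    ∀ (a : Nat) (y i : Int), (a : Int) ≤ N → 0 ≤ y → y ≤ N → 0 ≤ i → i ≤ K →
      pvGet3 ((PySem.List.pyRange (t : Int) N 1).foldl
        (fun pv x => (PySem.List.pyRange 0 (N+1) 1).foldl (fun pv y =>
          (PySem.List.pyRange 0 (K+1) 1).foldl (fun pv i => pvBody N K x pv y i) pv) pv) pv)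
        (a : Int) y i = pvF N K a (y, i) := by
  intro m
  induction m with
  | zero =>
      intro t pv hEq hsh hinv a y i h1 h2 h3 h4 h5
      rw [PySem.List.pyRange_one_eq_nil (show N ≤ (t : Int) by omega)]
      simp only [List.foldl_nil]
      rw [hinv a y i h1 h2 h3 h4 h5, if_pos (by omega)]
  | succ m ih =>
      intro t pv hEq hsh hinv a y i h1 h2 h3 h4 h5
      rw [PySem.List.pyRange_one_cons (by omega : (t : Int) < N)]
      simp only [List.foldl_cons]
      rw [pv_foldl_pairs N K (pvBody N K (t : Int))]
      have hcast : ((t+1 : Nat) : Int) = (t : Int) + 1 := by push_cast; ring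
      have hinner := pv_inner N K hN hK (t : Int) (by omega) (by omega) (pvF N K t)
        (pvPairs N K) [] pv (fun q hq => (pv_mem_pairs N K q).mp hq) hsh
        (fun y' i' hy1 hy2 hi1 hi2 => by
          rw [hinv t y' i' (by omega) hy1 hy2 hi1 hi2, if_pos le_rfl])
        (fun y' i' hy1 hy2 hi1 hi2 => by
          have h6 := hinv (t+1) y' i' (by omega) hy1 hy2 hi1 hi2
          rw [hcast] at h6
          rw [h6, if_neg (by omega)]
          simp)
      obtain ⟨sh', other', next'⟩ := hinner
      have hinv' : ∀ (a : Nat) (y i : Int), (a : Int) ≤ N → 0 ≤ y → y ≤ N → 0 ≤ i → i ≤ K →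
          pvGet3 ((pvPairs N K).foldl (fun s p => pvBody N K (t : Int) s p.1 p.2) pv)
            (a : Int) y i = if a ≤ t+1 then pvF N K a (y, i) else 0 := by
        intro a y i g1 g2 g3 g4 g5
        by_cases haeq : a = t+1
        · subst haeq
          rw [if_pos le_rfl]
          simp only [hcast]
          rw [next' y i g2 g3 g4 g5]
          have hF : pvF N K (t+1) (y, i)
              = (([] ++ pvPairs N K).map
                  (fun p => pvContrib N K (pvF N K t) p (y, i))).sum % pvMd := by
            simp [pvF]
          exact hF.symm
        · rw [other' (a : Int) y i (by omega) g1 g2 g4 (by omega)]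
          rw [hinv a y i g1 g2 g3 g4 g5]
          by_cases hle : a ≤ t
          · rw [if_pos hle, if_pos (by omega)]
          · rw [if_neg hle, if_neg (by omega)]
      have := ih (t+1) _ (by omega) sh' hinv'
      rw [hcast] at this
      exact this a y i h1 h2 h3 h4 h5

theorem pvA_eq (N K : Int) (hN : 0 ≤ N) (hK : 0 ≤ K) :
    route_finding N K = pvF N K N.toNat (0, K) % pvMd := by
  unfold route_finding
  dsimp only
  have hb : (fun (pvar : List (List (List Int))) (x : Int) =>
      (PySem.List.pyRange 0 (N+1) 1).foldl (fun pvar y =>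
        (PySem.List.pyRange 0 (K+1) 1).foldl (fun pvar i =>
          pvSet3
            (if y < N ∧ 0 < i then
              pvSet3 pvar (x+1) (y+1) (i-1)
                (PySem.Int.mod (pvGet3 pvar (x+1) (y+1) (i-1) + pvGet3 pvar x y i) 1000000007)
            else pvar) (x+1) (max 0 (y-1)) (if max 0 (y-1) = 0 then K else i)
            (PySem.Int.mod
              (pvGet3
                (if y < N ∧ 0 < i then
                  pvSet3 pvar (x+1) (y+1) (i-1)
                    (PySem.Int.mod (pvGet3 pvar (x+1) (y+1) (i-1) + pvGet3 pvar x y i) 1000000007)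
                else pvar) (x+1) (max 0 (y-1)) (if max 0 (y-1) = 0 then K else i)
                + pvGet3
                  (if y < N ∧ 0 < i then
                    pvSet3 pvar (x+1) (y+1) (i-1)
                      (PySem.Int.mod (pvGet3 pvar (x+1) (y+1) (i-1) + pvGet3 pvar x y i) 1000000007)
                  else pvar) x y i) 1000000007)) pvar) pvar)
      = (fun pv x => (PySem.List.pyRange 0 (N+1) 1).foldl (fun pv y =>
          (PySem.List.pyRange 0 (K+1) 1).foldl (fun pv i => pvBody N K x pv y i) pv) pv) := rfl
  rw [hb]
  -- the freshly built table, then the seed write at [0][0][K]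
  set init : List (List (List Int)) :=
    (PySem.List.pyRange 0 (N+1) 1).map (fun _ =>
      (PySem.List.pyRange 0 (N+1) 1).map (fun _ =>
        (PySem.List.pyRange 0 (K+1) 1).map (fun _ => (0 : Int)))) with hinit
  have hshInit : pvSh N K init := by
    refine ⟨by simp [hinit, PySem.List.length_pyRange_one], ?_⟩
    intro r hr
    rw [hinit] at hr
    rcases List.mem_map.mp hr with ⟨_, _, rfl⟩
    refine ⟨by simp [PySem.List.length_pyRange_one], ?_⟩
    intro s hs
    rcases List.mem_map.mp hs with ⟨_, _, rfl⟩
    simp [PySem.List.length_pyRange_one]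
  have hget0 : ∀ a y i : Int, 0 ≤ a → a < N+1 → 0 ≤ y → y < N+1 → 0 ≤ i → i < K+1 →
      pvGet3 init a y i = 0 := by
    intro a y i g1 g2 g3 g4 g5 g6
    rw [hinit]
    unfold pvGet3
    rw [PySem.List.pyGetD_map_pyRange_of_nonneg _ _ _ _ g1 g2,
        PySem.List.pyGetD_map_pyRange_of_nonneg _ _ _ _ g3 g4,
        PySem.List.pyGetD_map_pyRange_of_nonneg _ _ _ _ g5 g6]
  have hsh0 : pvSh N K (pvSet3 init 0 0 K 1) :=
    pv_sh_set3 N K init hshInit 0 0 K 1 le_rfl hN le_rfl hN hK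
  have hinv0 : ∀ (a : Nat) (y i : Int), (a : Int) ≤ N → 0 ≤ y → y ≤ N → 0 ≤ i → i ≤ K →
      pvGet3 (pvSet3 init 0 0 K 1) (a : Int) y i
        = if a ≤ 0 then pvF N K a (y, i) else 0 := by
    intro a y i g1 g2 g3 g4 g5
    rw [pv_get3_set3 N K init hshInit 0 0 K _ _ _ 1 le_rfl hN le_rfl hN hK le_rfl
        (by omega) g1 g2 g4]
    by_cases ha0 : a = 0
    · subst ha0
      rw [if_pos (le_refl (0 : Nat))]
      by_cases hyk : y = 0 ∧ i = K
      · rw [if_pos ⟨by norm_num, hyk.1, hyk.2⟩]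
        have : pvF N K 0 (y, i) = 1 := by
          rw [show ((y : Int), i) = ((0 : Int), K) from Prod.ext hyk.1 hyk.2]
          simp [pvF]
        rw [this]
      · rw [if_neg (by intro hcon; exact hyk ⟨hcon.2.1, hcon.2.2⟩)]
        simp only [Nat.cast_zero]
        rw [hget0 0 y i le_rfl (by omega) g2 (by omega) g4 (by omega)]
        have : pvF N K 0 (y, i) = 0 := by
          have hne : ((y : Int), i) ≠ ((0 : Int), K) := by
            intro hcon
            exact hyk ⟨congrArg Prod.fst hcon, congrArg Prod.snd hcon⟩
          simp [pvF, hne]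
        rw [this]
    · rw [if_neg (by omega), if_neg (by intro hcon; omega)]
      exact hget0 _ y i (by omega) (by omega) g2 (by omega) g4 (by omega)
  have hout := pv_outer N K hN hK N.toNat 0 (pvSet3 init 0 0 K 1) (by omega) hsh0 hinv0
    N.toNat 0 K (by omega) le_rfl hN hK le_rfl
  rw [Nat.cast_zero] at hout
  rw [show ((N.toNat : Nat) : Int) = N from by omega] at hout
  rw [hout, pv_mod_def]

-- ===== VERDICT (by name: the statement is the Claim_ definition above) =====
theorem route_finding_spec : Claim_equal_route_finding := by
  intro N K _ hpre
  unfold Spec_route_finding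
  rw [pvA_eq N K hpre.1 hpre.2, pvB_eq N K hpre.1 hpre.2, pv_core N K hpre.1 hpre.2]
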